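-- pv_equiv track=rewrite | github.com/stephendeslate/forge | src/forge/agent/edit_utils.py | _find_line_block
-- ===== SOURCE A (Python) =====
-- def _find_line_block(haystack: list[str], needle: list[str]) -> int | None:
--     """Find the starting index of needle lines within haystack lines."""
--     if not needle:
--         return None
--     n = len(needle)
--     for i in range(len(haystack) - n + 1):
--         if haystack[i : i + n] == needle:
--             return i
--     return None
-- ===== SOURCE B (Python) =====
-- def _find_line_block(haystack: list[str], needle: list[str]) -> int | None:
--     """Rabin-Karp: rolling hash over line hashes, verify on hash hit."""
--     if not needle:
--         return None
--     n = len(needle)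
--     H = len(haystack)
--     if n > H:
--         return None
--     M = (1 << 61) - 1
--     B = 1000003
--
--     def lh(s: str) -> int:
--         h = 0
--         for ch in s:
--             h = (h * 257 + ord(ch)) % M
--         return h
--
--     hs = [lh(s) for s in haystack]
--     target = 0
--     for s in needle:
--         target = (target * B + lh(s)) % M
--     pw = pow(B, n - 1, M)
--     h = 0
--     for v in hs[:n]:
--         h = (h * B + v) % M
--     for i in range(H - n + 1):
--         if h == target and haystack[i:i + n] == needle:
--             return i
--         if i + n < H:
--             h = ((h - hs[i] * pw) * B + hs[i + n]) % M
--     return None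
-- ===== Notes on version B (the rewrite author's own statement) =====
-- stated objective: alternative
-- what changed: Replaces A's scan that compares a fresh n-line slice at every position with Rabin-Karp: per-line hashes plus a rolling window hash select candidate positions, and only a hash hit triggers the one exact slice comparison.
import Mathlib
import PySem

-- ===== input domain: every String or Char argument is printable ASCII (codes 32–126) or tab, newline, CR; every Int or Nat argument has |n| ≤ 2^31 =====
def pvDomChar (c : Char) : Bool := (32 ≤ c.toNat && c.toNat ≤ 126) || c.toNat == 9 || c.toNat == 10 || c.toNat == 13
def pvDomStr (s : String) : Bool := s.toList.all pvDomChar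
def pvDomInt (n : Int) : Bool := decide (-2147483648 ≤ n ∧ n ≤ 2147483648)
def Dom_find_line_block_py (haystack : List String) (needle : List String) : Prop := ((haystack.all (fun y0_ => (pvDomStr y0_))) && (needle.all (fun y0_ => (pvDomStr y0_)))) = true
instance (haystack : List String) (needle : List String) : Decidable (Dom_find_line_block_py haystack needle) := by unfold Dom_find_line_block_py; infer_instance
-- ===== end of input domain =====

-- B replaces A's quadratic slice-compare scan by Rabin–Karp: a rolling hash over
-- per-line hashes selects candidate positions, verified by one exact comparison.

-- ===== PORT A =====
def find_line_block_py (haystack : List String) (needle : List String) : Option Int :=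
  if needle = [] then none
  else
    -- n = len(needle); for i in range(len(haystack) - n + 1): if haystack[i:i+n] == needle: return i
    (PySem.List.pyRange 0 ((haystack.length : Int) - (needle.length : Int) + 1) 1).find?
      (fun i => PySem.List.slice haystack (some i) (some (i + (needle.length : Int))) == needle)

-- ===== PORT B =====
def pvM : Int := 2305843009213693951  -- (1 << 61) - 1
def pvB : Int := 1000003

-- Python's '%' with the positive modulus pvM equals Int.emod (exact here).
def lineHash (s : String) : Int :=
  s.toList.foldl (fun h ch => (h * 257 + (ch.toNat : Int)) % pvM) 0

def hashStep (h v : Int) : Int := (h * pvB + v) % pvM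

-- the final for-loop of Source B; `hs.getD i 0` ports `hs[i]` (always in range here)
def altLoop (haystack needle : List String) (hs : List Int) (target pw : Int) (n H : Nat) :
    Nat → Nat → Int → Option Int
  | 0, _, _ => none
  | k+1, i, h =>
    if h == target && (PySem.List.slice haystack (some (i : Int)) (some ((i : Int) + (n : Int))) == needle) then
      some (i : Int)
    else
      altLoop haystack needle hs target pw n H k (i+1)
        (if i + n < H then ((h - hs.getD i 0 * pw) * pvB + hs.getD (i+n) 0) % pvM else h)

def find_line_block_py_alt (haystack : List String) (needle : List String) : Option Int :=
  if needle = [] then none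
  else if needle.length > haystack.length then none
  else
    -- hs = [lh(s) for s in haystack]; target = fold of lh over needle;
    -- pw = pow(B, n-1, M); h = hash of hs[:n]; then the scanning loop
    altLoop haystack needle (haystack.map lineHash)
      (needle.foldl (fun t s => hashStep t (lineHash s)) 0)
      ((pvB ^ (needle.length - 1)) % pvM) needle.length haystack.length
      (haystack.length - needle.length + 1) 0
      (((haystack.map lineHash).take needle.length).foldl hashStep 0)

-- ===== PRECONDITION & SPEC =====
def Spec_find_line_block_py (haystack : List String) (needle : List String) (out : Option Int) : Prop := out = find_line_block_py_alt haystack needle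
instance (haystack : List String) (needle : List String) (out : Option Int) : Decidable (Spec_find_line_block_py haystack needle out) := by unfold Spec_find_line_block_py; infer_instance

-- ===== CLAIM (what is proved, stated in full; the proofs are below) =====
def Claim_equal_find_line_block_py : Prop := ∀ (haystack : List String) (needle : List String), Dom_find_line_block_py haystack needle → Spec_find_line_block_py haystack needle (find_line_block_py haystack needle)

-- ===== LEMMAS AND PROOFS =====

-- hash of the length-n window of hs starting at i
def winH (hs : List Int) (n i : Nat) : Int := ((hs.drop i).take n).foldl hashStep 0

lemma modeq_emod (a : Int) : Int.ModEq pvM (a % pvM) a :=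
  Int.emod_emod_of_dvd a dvd_rfl

lemma foldl_hash_modeq (l : List Int) (h : Int) :
    Int.ModEq pvM (l.foldl hashStep h) (h * pvB ^ l.length + l.foldl hashStep 0) := by
  induction l generalizing h with
  | nil => simp [Int.ModEq]
  | cons v l ih =>
    have h1 : Int.ModEq pvM (List.foldl hashStep h (v :: l))
        ((h * pvB + v) * pvB ^ l.length + List.foldl hashStep 0 l) := by
      refine ((ih (hashStep h v)).trans ?_)
      exact ((modeq_emod (h * pvB + v)).mul_right _).add_right _
    have h2 : Int.ModEq pvM (v * pvB ^ l.length + List.foldl hashStep 0 l)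
        (List.foldl hashStep 0 (v :: l)) := by
      refine (Int.ModEq.symm ((ih (hashStep 0 v)).trans ?_))
      have : hashStep 0 v = v % pvM := by simp [hashStep]
      rw [this]
      exact ((modeq_emod v).mul_right _).add_right _
    calc List.foldl hashStep h (v :: l)
        ≡ (h * pvB + v) * pvB ^ l.length + List.foldl hashStep 0 l [ZMOD pvM] := h1
      _ = h * pvB ^ (l.length + 1) + (v * pvB ^ l.length + List.foldl hashStep 0 l) := by ring
      _ ≡ h * pvB ^ (l.length + 1) + List.foldl hashStep 0 (v :: l) [ZMOD pvM] :=
          (Int.ModEq.refl _).add h2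
      _ = h * pvB ^ (v :: l).length + List.foldl hashStep 0 (v :: l) := by simp

lemma winH_roll (hs : List Int) (n i : Nat) (hn : 1 ≤ n) (hlt : i + n < hs.length) :
    winH hs n (i+1)
      = ((winH hs n i - hs.getD i 0 * ((pvB ^ (n-1)) % pvM)) * pvB + hs.getD (i+n) 0) % pvM := by
  have hi : i < hs.length := by omega
  have hxg : hs.getD i 0 = hs[i] := by
    rw [List.getD_eq_getElem?_getD, List.getElem?_eq_getElem hi]; rfl
  have hyg : hs.getD (i+n) 0 = hs[i+n] := by
    rw [List.getD_eq_getElem?_getD, List.getElem?_eq_getElem hlt]; rfl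
  have htlen : ((hs.drop (i+1)).take (n-1)).length = n - 1 := by
    simp [List.length_take, List.length_drop]; omega
  have hwi : (hs.drop i).take n = hs[i] :: (hs.drop (i+1)).take (n-1) := by
    rw [List.drop_eq_getElem_cons hi]
    have : n = (n-1) + 1 := by omega
    rw [this, List.take_succ_cons]
    simp
  have hwi1 : (hs.drop (i+1)).take n = (hs.drop (i+1)).take (n-1) ++ [hs[i+n]] := by
    have h1 : n = (n-1) + 1 := by omega
    conv_lhs => rw [h1]
    rw [List.take_add_one]
    congr 1
    rw [List.getElem?_drop]
    have : i + 1 + (n - 1) = i + n := by omega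
    rw [this, List.getElem?_eq_getElem hlt]
    rfl
  set t := (hs.drop (i+1)).take (n-1) with ht
  have hL : winH hs n (i+1) = (List.foldl hashStep 0 t * pvB + hs[i+n]) % pvM := by
    simp only [winH]
    rw [hwi1, List.foldl_append]
    rfl
  rw [hL, hxg, hyg]
  simp only [winH]
  rw [hwi]
  have hcons : Int.ModEq pvM (List.foldl hashStep 0 (hs[i] :: t))
      (hs[i] * pvB ^ (n-1) + List.foldl hashStep 0 t) := by
    have h0 : List.foldl hashStep 0 (hs[i] :: t) = List.foldl hashStep (hashStep 0 hs[i]) t := rfl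
    rw [h0]
    refine (foldl_hash_modeq t (hashStep 0 hs[i])).trans ?_
    have hx : hashStep 0 hs[i] = hs[i] % pvM := by simp [hashStep]
    rw [hx, htlen]
    exact ((modeq_emod hs[i]).mul_right _).add_right _
  have hpw : Int.ModEq pvM (hs[i] * (pvB ^ (n-1) % pvM)) (hs[i] * pvB ^ (n-1)) :=
    (modeq_emod _).mul_left _
  have hsub : Int.ModEq pvM
      (List.foldl hashStep 0 (hs[i] :: t) - hs[i] * (pvB ^ (n-1) % pvM))
      (List.foldl hashStep 0 t) := by
    have h2 := hcons.sub hpw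
    have h3 : hs[i] * pvB ^ (n-1) + List.foldl hashStep 0 t - hs[i] * pvB ^ (n-1)
        = List.foldl hashStep 0 t := by ring
    rw [h3] at h2
    exact h2
  exact ((hsub.mul_right pvB).add_right hs[i+n]).symm

lemma hash_sound (haystack needle : List String) (i : Nat)
    (hP : (haystack.drop i).take needle.length = needle) :
    winH (haystack.map lineHash) needle.length i
      = needle.foldl (fun t s => hashStep t (lineHash s)) 0 := by
  simp only [winH]
  rw [← List.map_drop, ← List.map_take, hP, List.foldl_map]

lemma altLoop_eq (haystack needle : List String) (hn : 1 ≤ needle.length)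
    (hnH : needle.length ≤ haystack.length) :
    ∀ (k i : Nat) (h : Int),
      i + k = haystack.length - needle.length + 1 →
      (k ≠ 0 → h = winH (haystack.map lineHash) needle.length i) →
      altLoop haystack needle (haystack.map lineHash)
        (needle.foldl (fun t s => hashStep t (lineHash s)) 0)
        ((pvB ^ (needle.length - 1)) % pvM) needle.length haystack.length k i h
      = (PySem.List.pyRange (i : Int) ((haystack.length - needle.length + 1 : Nat) : Int) 1).find?
          (fun j => PySem.List.slice haystack (some j) (some (j + (needle.length : Int))) == needle) := by
  intro k
  induction k with
  | zero =>
    intro i h hk _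
    rw [PySem.List.pyRange_one_eq_nil (by omega)]
    simp [altLoop]
  | succ k ih =>
    intro i h hk hh
    have hwin : h = winH (haystack.map lineHash) needle.length i := hh (by simp)
    have hiN : (i : Int) < ((haystack.length - needle.length + 1 : Nat) : Int) := by omega
    rw [PySem.List.pyRange_one_cons hiN]
    by_cases hsl : PySem.List.slice haystack (some (i:Int)) (some ((i:Int) + (needle.length:Int))) = needle
    · have hP : (haystack.drop i).take needle.length = needle := by
        rw [← PySem.List.slice_natCast_add]
        exact hsl
      have htar : h = needle.foldl (fun t s => hashStep t (lineHash s)) 0 := by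
        rw [hwin]; exact hash_sound haystack needle i hP
      rw [List.find?_cons_of_pos (by simp [hsl])]
      simp only [altLoop]
      rw [if_pos (by simp [hsl, htar])]
    · rw [List.find?_cons_of_neg (by simp [hsl])]
      simp only [altLoop]
      rw [if_neg (by simp [hsl])]
      have hcast : ((i:Int) + 1) = ((i+1 : Nat) : Int) := by push_cast; ring
      rw [hcast]
      norm_cast
      refine (ih (i+1) _ (by omega) ?_)
      intro hk0
      have hlt : i + needle.length < haystack.length := by omega
      rw [if_pos hlt, hwin]
      exact (winH_roll (haystack.map lineHash) needle.length i hn (by simpa using hlt)).symm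

-- ===== VERDICT (by name: the statement is the Claim_ definition above) =====
theorem find_line_block_py_spec : Claim_equal_find_line_block_py := by
  intro haystack needle _
  unfold Spec_find_line_block_py find_line_block_py find_line_block_py_alt
  by_cases hne : needle = []
  · simp [hne]
  · rw [if_neg hne, if_neg hne]
    by_cases hnh : needle.length > haystack.length
    · rw [if_pos hnh]
      rw [PySem.List.pyRange_one_eq_nil (by omega)]
      simp
    · rw [if_neg hnh]
      have hn1 : 1 ≤ needle.length := List.length_pos_of_ne_nil hne
      have key := altLoop_eq haystack needle hn1 (not_lt.mp hnh)
        (haystack.length - needle.length + 1) 0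
        ((((haystack.map lineHash)).take needle.length).foldl hashStep 0)
        (by omega) (fun _ => by simp [winH])
      rw [key]
      have hcast : ((haystack.length - needle.length + 1 : Nat) : Int)
          = (haystack.length : Int) - (needle.length : Int) + 1 := by omega
      rw [hcast]
      norm_cast
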